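-- pv_equiv track=rewrite | github.com/neel-patel-1/GettingStartedWithBril | lesson12/optimizations/fill_labels.py | fill_ir
-- ===== SOURCE A (Python) =====
-- def is_label_stmt(stmt):
--     # A pure label declaration has exactly one key "label"
--     return isinstance(stmt, dict) and stmt.keys() == {"label"}
--
-- def fill_ir(ir, labels, occs, canon):
--     """
--     Walk through IR. Whenever you hit label@i with next label@j where
--     (lab1,lab2) in canon,
--       • emit the label stmt
--       • if original block non‐empty, emit it; else emit canon[(lab1,lab2)]
--       • skip ahead to j
--     Otherwise just copy stmt[i].
--     """
--     label_at = {i: lab for i, lab in labels}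
--     next_idx = {i: j for (i,_), (j,_) in zip(labels, labels[1:])}
--
--     out = []
--     i = 0
--     n = len(ir)
--     while i < n:
--         if i in label_at and i in next_idx:
--             lab1 = label_at[i]
--             j    = next_idx[i]
--             lab2 = label_at[j]
--             key  = (lab1, lab2)
--             if key in canon:
--                 # emit the label itself
--                 out.append(ir[i])
--                 # original between i+1 and j
--                 orig = [stmt for stmt in ir[i+1:j] if not is_label_stmt(stmt)]
--                 if orig:
--                     out.extend(orig)
--                 else:
--                     out.extend(canon[key])
--                 # jump to the next label
--                 i = j
--                 continue
--
--         # default: copy current stmt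
--         out.append(ir[i])
--         i += 1
--
--     return out
-- ===== SOURCE B (Python) =====
-- def is_label_stmt(stmt):
--     # A pure label declaration has exactly one key "label"
--     return isinstance(stmt, dict) and stmt.keys() == {"label"}
--
-- def fill_ir(ir, labels, occs, canon):
--     """Two-stage rewrite: first precompute, from the consecutive label pairs,
--     the replacement segments (start, end, replacement); then splice them into
--     ir by copying the verbatim gaps between segments with slices."""
--     n = len(ir)
--     segs = []
--     for (i, l1), (j, l2) in zip(labels, labels[1:]):
--         if 0 <= i < n and (l1, l2) in canon:
--             orig = [s for s in ir[i + 1:j] if not is_label_stmt(s)]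
--             segs.append((i, j, [ir[i]] + (orig if orig else canon[(l1, l2)])))
--     out = []
--     pos = 0
--     for i, j, repl in segs:
--         out.extend(ir[pos:i])
--         out.extend(repl)
--         pos = j
--     out.extend(ir[pos:])
--     return out
-- ===== Notes on version B (the rewrite author's own statement) =====
-- stated objective: simpler
-- what changed: Replaces A's index-by-index while loop driven by the label_at/next_idx dicts with a two-stage rewrite: first precompute replacement segments from the zipped consecutive label pairs, then splice them into ir by copying the verbatim gaps with slices.
import Mathlib
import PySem

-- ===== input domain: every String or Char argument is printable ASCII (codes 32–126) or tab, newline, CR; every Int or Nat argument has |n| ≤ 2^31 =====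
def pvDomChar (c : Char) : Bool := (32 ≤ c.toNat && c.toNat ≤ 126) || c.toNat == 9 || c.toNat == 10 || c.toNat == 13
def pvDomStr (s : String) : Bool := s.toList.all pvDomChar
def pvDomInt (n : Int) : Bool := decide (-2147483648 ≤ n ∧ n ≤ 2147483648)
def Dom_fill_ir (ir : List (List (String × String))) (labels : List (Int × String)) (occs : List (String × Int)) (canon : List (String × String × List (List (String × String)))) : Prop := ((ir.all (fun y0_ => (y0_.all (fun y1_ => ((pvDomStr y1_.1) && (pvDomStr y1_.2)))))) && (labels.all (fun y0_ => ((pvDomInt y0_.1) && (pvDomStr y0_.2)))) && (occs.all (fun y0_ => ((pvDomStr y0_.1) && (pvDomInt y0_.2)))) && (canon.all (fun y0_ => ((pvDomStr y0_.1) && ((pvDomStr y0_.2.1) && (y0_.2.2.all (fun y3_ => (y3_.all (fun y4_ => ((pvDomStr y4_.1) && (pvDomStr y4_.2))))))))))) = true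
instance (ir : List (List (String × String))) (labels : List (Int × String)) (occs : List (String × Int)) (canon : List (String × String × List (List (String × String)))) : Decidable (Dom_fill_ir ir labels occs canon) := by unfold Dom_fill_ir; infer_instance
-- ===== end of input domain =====

-- B replaces A's index-by-index while loop over the label_at/next_idx dicts by a two-stage
-- rewrite: precompute the replacement segments from consecutive label pairs, then splice
-- them into ir with slice copies (objective: simpler); equivalence proved on Pre_.

-- ===== PORT A =====

-- isinstance(stmt, dict) is always true here; stmt.keys() == {"label"} is set equality of the
-- key set with a singleton, i.e. the deduplicated key list is exactly ["label"].
def pvIsLabelStmt (stmt : List (String × String)) : Bool :=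
  (PySem.Dict.ofList stmt).keys == ["label"]

-- '(lab1, lab2) in canon' / 'canon[(lab1, lab2)]': first match in the association list
def pvCanonGet? (canon : List (String × String × List (List (String × String)))) (k1 k2 : String) :
    Option (List (List (String × String))) :=
  (canon.find? (fun c => c.1 == k1 && c.2.1 == k2)).map (fun c => c.2.2)

-- the while loop of A, with fuel (one unit per iteration; under Pre_ the loop index i grows by
-- at least 1 per iteration starting from 0, so fuel = len(ir) is enough)
def pvLoopA (ir : List (List (String × String))) (canon : List (String × String × List (List (String × String))))
    (labelAt : PySem.Dict Int String) (nextIdx : PySem.Dict Int Int) :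
    Nat → List (List (String × String)) → Int → List (List (String × String))
  | 0, out, _ => out
  | fuel + 1, out, i =>
    if i < (ir.length : Int) then
      match labelAt.get? i, nextIdx.get? i with
      | some lab1, some j =>
        -- label_at[j]: j is always a label position (a value of next_idx), so get? is some
        let lab2 := (labelAt.get? j).getD ""
        match pvCanonGet? canon lab1 lab2 with
        | some block =>
          let orig := (PySem.List.slice ir (some (i + 1)) (some j)).filter (fun s => !pvIsLabelStmt s)
          pvLoopA ir canon labelAt nextIdx fuel
            (out ++ [PySem.List.pyGetD ir i []] ++ (if orig.isEmpty then block else orig)) j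
        | none => pvLoopA ir canon labelAt nextIdx fuel (out ++ [PySem.List.pyGetD ir i []]) (i + 1)
      | _, _ => pvLoopA ir canon labelAt nextIdx fuel (out ++ [PySem.List.pyGetD ir i []]) (i + 1)
    else out

def fill_ir (ir : List (List (String × String))) (labels : List (Int × String)) (occs : List (String × Int)) (canon : List (String × String × List (List (String × String)))) : List (List (String × String)) :=
  let labelAt : PySem.Dict Int String := PySem.Dict.ofList labels
  let nextIdx : PySem.Dict Int Int :=
    PySem.Dict.ofList ((labels.zip labels.tail).map (fun p => (p.1.1, p.2.1)))
  pvLoopA ir canon labelAt nextIdx ir.length [] 0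

-- ===== PORT B =====

-- stage 1 of B: from the zipped consecutive label pairs, the replacement segments
-- (start, end, replacement block); the first for-loop of Source B
def pvSegs (ir : List (List (String × String))) (canon : List (String × String × List (List (String × String)))) :
    List ((Int × String) × (Int × String)) → List (Int × Int × List (List (String × String)))
  | [] => []
  | ((i, l1), (j, l2)) :: ps =>
    if 0 ≤ i ∧ i < (ir.length : Int) then
      match pvCanonGet? canon l1 l2 with
      | some block =>
        let orig := (PySem.List.slice ir (some (i + 1)) (some j)).filter (fun s => !pvIsLabelStmt s)
        (i, j, PySem.List.pyGetD ir i [] :: (if orig.isEmpty then block else orig)) :: pvSegs ir canon ps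
      | none => pvSegs ir canon ps
    else pvSegs ir canon ps

-- stage 2 of B: splice the segments into ir, copying the gaps with slices; the second loop
def pvSplice (ir : List (List (String × String))) :
    List (Int × Int × List (List (String × String))) → List (List (String × String)) → Int → List (List (String × String))
  | [], out, pos => out ++ PySem.List.slice ir (some pos) none
  | (i, j, repl) :: rest, out, pos =>
    pvSplice ir rest (out ++ PySem.List.slice ir (some pos) (some i) ++ repl) j

def fill_ir_alt (ir : List (List (String × String))) (labels : List (Int × String)) (occs : List (String × Int)) (canon : List (String × String × List (List (String × String)))) : List (List (String × String)) :=
  pvSplice ir (pvSegs ir canon (labels.zip labels.tail)) [] 0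

-- ===== PRECONDITION & SPEC =====

-- Pre_ asks the label positions to be strictly increasing, except when no pair of label names
-- is a canon key at all (then both programs plainly copy ir): outside this, A can loop forever
-- (a canonical pair jumping backwards) and with duplicate/unsorted positions A's pairing via
-- dict overwrite in label_at/next_idx is an accident of the implementation.
def Pre_fill_ir (ir : List (List (String × String))) (labels : List (Int × String)) (occs : List (String × Int)) (canon : List (String × String × List (List (String × String)))) : Prop :=
  labels.Pairwise (fun a b => a.1 < b.1) ∨
    ∀ a ∈ labels, ∀ b ∈ labels, ∀ c ∈ canon, c.1 ≠ a.2 ∨ c.2.1 ≠ b.2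
instance (ir : List (List (String × String))) (labels : List (Int × String)) (occs : List (String × Int)) (canon : List (String × String × List (List (String × String)))) : Decidable (Pre_fill_ir ir labels occs canon) := by unfold Pre_fill_ir; infer_instance

def pvWitness_fill_ir : (List (List (String × String))) × (List (Int × String)) × (List (String × Int)) × (List (String × String × List (List (String × String)))) :=
  ([[("op", "x")], [("label", "a")], [("label", "b")], [("op", "y")]],
   [(1, "a"), (2, "b")],
   [("a", 1)],
   [("a", "b", [[("op", "z")]])])

def Spec_fill_ir (ir : List (List (String × String))) (labels : List (Int × String)) (occs : List (String × Int)) (canon : List (String × String × List (List (String × String)))) (out : List (List (String × String))) : Prop := out = fill_ir_alt ir labels occs canon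
instance (ir : List (List (String × String))) (labels : List (Int × String)) (occs : List (String × Int)) (canon : List (String × String × List (List (String × String)))) (out : List (List (String × String))) : Decidable (Spec_fill_ir ir labels occs canon out) := by unfold Spec_fill_ir; infer_instance

-- ===== CLAIM (what is proved, stated in full; the proofs are below) =====
def Claim_equal_fill_ir : Prop := ∀ (ir : List (List (String × String))) (labels : List (Int × String)) (occs : List (String × Int)) (canon : List (String × String × List (List (String × String)))), Dom_fill_ir ir labels occs canon → Pre_fill_ir ir labels occs canon → Spec_fill_ir ir labels occs canon (fill_ir ir labels occs canon)

-- ===== LEMMAS AND PROOFS =====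

-- dict lookup after an update when no pair carries the key
theorem pvGetUpdateNone {β : Type} (L : List (Int × β)) (d : PySem.Dict Int β) (k : Int)
    (h : ∀ p ∈ L, p.1 ≠ k) : (d.update L).get? k = d.get? k := by
  induction L generalizing d with
  | nil => rfl
  | cons p L ih =>
    have h1 : ∀ q ∈ L, q.1 ≠ k := fun q hq => h q (List.mem_cons_of_mem _ hq)
    simp only [PySem.Dict.update, List.foldl_cons] at *
    rw [ih _ h1, PySem.Dict.get?_insert, if_neg]
    exact fun hk => h p List.mem_cons_self hk.symm

-- dict built from pairs with distinct keys: lookup finds the member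
theorem pvGetUpdateSome {β : Type} (L : List (Int × β)) (d : PySem.Dict Int β) (k : Int) (v : β)
    (hmem : (k, v) ∈ L) (hnd : (L.map Prod.fst).Nodup) :
    (d.update L).get? k = some v := by
  induction L generalizing d with
  | nil => simp at hmem
  | cons p L ih =>
    simp only [List.map_cons, List.nodup_cons] at hnd
    rcases List.mem_cons.mp hmem with h | h
    · subst h
      simp only [PySem.Dict.update, List.foldl_cons]
      have : ∀ q ∈ L, q.1 ≠ k := by
        intro q hq hk
        exact hnd.1 (hk ▸ (List.mem_map_of_mem hq : q.1 ∈ L.map Prod.fst))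
      rw [show (List.foldl (fun acc p => acc.insert p.1 p.2) (d.insert k v) L) = ((d.insert k v).update L) from rfl,
        pvGetUpdateNone L _ k this, PySem.Dict.get?_insert, if_pos rfl]
    · simp only [PySem.Dict.update, List.foldl_cons]
      exact ih _ h hnd.2

theorem pvGetOfListNone {β : Type} (L : List (Int × β)) (k : Int)
    (h : ∀ p ∈ L, p.1 ≠ k) : (PySem.Dict.ofList L).get? k = none := by
  rw [show PySem.Dict.ofList L = PySem.Dict.empty.update L from rfl, pvGetUpdateNone L _ k h]
  simp [pysem]

theorem pvGetOfListSome {β : Type} (L : List (Int × β)) (k : Int) (v : β)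
    (hmem : (k, v) ∈ L) (hnd : (L.map Prod.fst).Nodup) :
    (PySem.Dict.ofList L).get? k = some v :=
  pvGetUpdateSome L _ k v hmem hnd

-- a looked-up value comes from the pair list (or from the starting dict)
theorem pvGetUpdateVal {β : Type} (L : List (Int × β)) (d : PySem.Dict Int β) (k : Int) (v : β)
    (h : (d.update L).get? k = some v) : v ∈ L.map Prod.snd ∨ d.get? k = some v := by
  induction L generalizing d with
  | nil => exact Or.inr h
  | cons p L ih =>
    simp only [PySem.Dict.update, List.foldl_cons] at h
    rcases ih _ h with h' | h'
    · exact Or.inl (List.mem_cons_of_mem _ h')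
    · rw [PySem.Dict.get?_insert] at h'
      split_ifs at h' with hk
      · exact Or.inl (by simp only [List.map_cons]; exact (Option.some_inj.mp h') ▸ List.mem_cons_self)
      · exact Or.inr h'

theorem pvGetOfListVal {β : Type} (L : List (Int × β)) (k : Int) (v : β)
    (h : (PySem.Dict.ofList L).get? k = some v) : v ∈ L.map Prod.snd := by
  rcases pvGetUpdateVal L PySem.Dict.empty k v h with h' | h'
  · exact h'
  · simp [pysem] at h'

-- a failed lookup means the key is in none of the pairs
theorem pvGetUpdateNoneKeys {β : Type} (L : List (Int × β)) (d : PySem.Dict Int β) (k : Int)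
    (h : (d.update L).get? k = none) : k ∉ L.map Prod.fst := by
  induction L generalizing d with
  | nil => simp
  | cons p L ih =>
    simp only [PySem.Dict.update, List.foldl_cons] at h
    intro hmem
    simp only [List.map_cons, List.mem_cons] at hmem
    rcases hmem with hk | hk
    · by_cases hkL : k ∈ L.map Prod.fst
      · exact ih _ h hkL
      · have hnone := pvGetUpdateNone L (d.insert p.1 p.2) k
          (fun q hq hq1 => hkL (hq1 ▸ (List.mem_map_of_mem hq : q.1 ∈ L.map Prod.fst)))
        rw [show (List.foldl (fun acc p => acc.insert p.1 p.2) (d.insert p.1 p.2) L) = ((d.insert p.1 p.2).update L) from rfl,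
          hnone, PySem.Dict.get?_insert, if_pos hk] at h
        simp at h
    · exact ih _ h hk

theorem pvGetOfListIsSome {β : Type} (L : List (Int × β)) (k : Int)
    (h : k ∈ L.map Prod.fst) : ((PySem.Dict.ofList L).get? k).isSome := by
  cases hg : (PySem.Dict.ofList L).get? k
  · exact absurd h (pvGetUpdateNoneKeys L PySem.Dict.empty k hg)
  · rfl

-- consecutive elements of a list are a member of zip with the tail
theorem pvMemZipTail {α : Type} (pre : List α) (a b : α) (t : List α) :
    (a, b) ∈ (pre ++ a :: b :: t).zip (pre ++ a :: b :: t).tail := by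
  induction pre with
  | nil => simp [List.zip]
  | cons p pre ih =>
    rcases hM : pre ++ a :: b :: t with _ | ⟨m, M'⟩
    · simp at hM
    · simp only [List.cons_append, hM, List.tail_cons, List.zip_cons_cons]
      rw [← hM]
      exact List.mem_cons_of_mem _ (by simpa [hM] using ih)

-- the first components of zip-with-tail pairs are the list without its last element
theorem pvMapFstZipTail {α : Type} (L : List α) : (L.zip L.tail).map Prod.fst = L.dropLast := by
  induction L with
  | nil => rfl
  | cons a L ih =>
    cases L with
    | nil => rfl
    | cons b t =>
      simp only [List.tail_cons, List.zip_cons_cons, List.map_cons, List.dropLast_cons₂]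
      rw [← ih]
      rfl

-- slice cons/empty helpers
theorem pvSliceEmpty {α : Type} (xs : List α) (a : Int) (h : 0 ≤ a) :
    PySem.List.slice xs (some a) (some a) = [] := by
  rw [PySem.List.slice_toNat xs h h]; simp

theorem pvSliceConsTo {α : Type} (xs : List α) (a b : Int) (d : α) (ha : 0 ≤ a) (hab : a < b)
    (hlen : a < (xs.length : Int)) :
    PySem.List.slice xs (some a) (some b) = PySem.List.pyGetD xs a d :: PySem.List.slice xs (some (a + 1)) (some b) := by
  rw [PySem.List.slice_toNat xs ha (by omega), PySem.List.slice_toNat xs (by omega : (0:Int) ≤ a + 1) (by omega),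
    PySem.List.pyGetD_eq_getElem xs d ha hlen]
  rw [List.drop_eq_getElem_cons (by omega : a.toNat < xs.length)]
  have h1 : (a + 1).toNat = a.toNat + 1 := by omega
  have h2 : b.toNat - a.toNat = (b.toNat - (a + 1).toNat) + 1 := by omega
  rw [h2, List.take_succ_cons, h1]

theorem pvSliceConsFrom {α : Type} (xs : List α) (a : Int) (d : α) (ha : 0 ≤ a)
    (hlen : a < (xs.length : Int)) :
    PySem.List.slice xs (some a) none = PySem.List.pyGetD xs a d :: PySem.List.slice xs (some (a + 1)) none := by
  rw [PySem.List.slice_from xs ha, PySem.List.slice_from xs (by omega : (0:Int) ≤ a + 1),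
    PySem.List.pyGetD_eq_getElem xs d ha hlen,
    List.drop_eq_getElem_cons (by omega : a.toNat < xs.length)]
  have h1 : (a + 1).toNat = a.toNat + 1 := by omega
  rw [h1]

theorem pvSliceFromEmpty {α : Type} (xs : List α) (a : Int) (ha : 0 ≤ a) (h : (xs.length : Int) ≤ a) :
    PySem.List.slice xs (some a) none = [] := by
  rw [PySem.List.slice_from xs ha]
  exact List.drop_eq_nil_of_le (by omega)

theorem pvSliceSplitFrom {α : Type} (xs : List α) (a b : Int) (ha : 0 ≤ a) (hab : a ≤ b) :
    PySem.List.slice xs (some a) none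
      = PySem.List.slice xs (some a) (some b) ++ PySem.List.slice xs (some b) none := by
  rw [PySem.List.slice_from xs ha, PySem.List.slice_from xs (by omega : (0:Int) ≤ b),
    PySem.List.slice_toNat xs ha (by omega)]
  rw [show List.drop b.toNat xs = List.drop (b.toNat - a.toNat) (List.drop a.toNat xs) by
    rw [List.drop_drop]; congr 1; omega]
  exact (List.take_append_drop _ _).symm

theorem pvSliceSplitTo {α : Type} (xs : List α) (a b c : Int) (ha : 0 ≤ a) (hab : a ≤ b) (hbc : b ≤ c) :
    PySem.List.slice xs (some a) (some c)
      = PySem.List.slice xs (some a) (some b) ++ PySem.List.slice xs (some b) (some c) := by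
  rw [PySem.List.slice_toNat xs ha (by omega), PySem.List.slice_toNat xs ha (by omega),
    PySem.List.slice_toNat xs (by omega : (0:Int) ≤ b) (by omega)]
  rw [show List.drop b.toNat xs = List.drop (b.toNat - a.toNat) (List.drop a.toNat xs) by
    rw [List.drop_drop]; congr 1; omega]
  rw [show c.toNat - a.toNat = (b.toNat - a.toNat) + (c.toNat - b.toNat) by omega,
    List.take_add]

-- A's loop over a run of non-label positions copies the run verbatim (one fuel per index)
theorem pvCopyA (ir : List (List (String × String))) (canon : List (String × String × List (List (String × String))))
    (labelAt : PySem.Dict Int String) (nextIdx : PySem.Dict Int Int) :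
    ∀ (g fuel : Nat) (out : List (List (String × String))) (pos : Int), 0 ≤ pos →
      pos + (g : Int) ≤ (ir.length : Int) →
      (∀ x : Int, pos ≤ x → x < pos + (g : Int) → labelAt.get? x = none) →
      pvLoopA ir canon labelAt nextIdx (g + fuel) out pos
        = pvLoopA ir canon labelAt nextIdx fuel
            (out ++ PySem.List.slice ir (some pos) (some (pos + (g : Int)))) (pos + (g : Int)) := by
  intro g
  induction g with
  | zero =>
    intro fuel out pos h0 _ _
    simp [pvSliceEmpty ir pos h0]
  | succ g ih =>
    intro fuel out pos h0 hle hnone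
    have hstep : g + 1 + fuel = (g + fuel) + 1 := by omega
    rw [hstep]
    have hlt : pos < (ir.length : Int) := by push_cast at hle ⊢; omega
    have hla : labelAt.get? pos = none := hnone pos le_rfl (by push_cast; omega)
    rw [pvLoopA, if_pos hlt, hla]
    have hrec : pvLoopA ir canon labelAt nextIdx (g + fuel) (out ++ [PySem.List.pyGetD ir pos []]) (pos + 1)
        = pvLoopA ir canon labelAt nextIdx fuel
            ((out ++ [PySem.List.pyGetD ir pos []]) ++ PySem.List.slice ir (some (pos + 1)) (some (pos + 1 + (g : Int)))) (pos + 1 + (g : Int)) := by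
      apply ih
      · omega
      · push_cast at hle ⊢; omega
      · intro x hx1 hx2
        exact hnone x (by omega) (by push_cast at hx2 ⊢; omega)
    have hgoal1 : pos + ((g : Int) + 1) = pos + 1 + (g : Int) := by omega
    have hslice : PySem.List.slice ir (some pos) (some (pos + ((g + 1 : Nat) : Int)))
        = PySem.List.pyGetD ir pos [] :: PySem.List.slice ir (some (pos + 1)) (some (pos + 1 + (g : Int))) := by
      push_cast
      rw [hgoal1, pvSliceConsTo ir pos (pos + 1 + (g : Int)) [] h0 (by omega) hlt]
    cases hm : nextIdx.get? pos
    · rw [hrec, hslice]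
      push_cast
      rw [hgoal1]
      congr 1
      simp
    · rw [hrec, hslice]
      push_cast
      rw [hgoal1]
      congr 1
      simp

-- A's loop with no label position left copies the rest of ir verbatim
theorem pvTailA (ir : List (List (String × String))) (canon : List (String × String × List (List (String × String))))
    (labelAt : PySem.Dict Int String) (nextIdx : PySem.Dict Int Int) :
    ∀ (fuel : Nat) (out : List (List (String × String))) (pos : Int), 0 ≤ pos →
      (ir.length : Int) ≤ pos + (fuel : Int) →
      (∀ x : Int, pos ≤ x → x < (ir.length : Int) → labelAt.get? x = none) →
      pvLoopA ir canon labelAt nextIdx fuel out pos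
        = out ++ PySem.List.slice ir (some pos) none := by
  intro fuel
  induction fuel with
  | zero =>
    intro out pos h0 hn _
    rw [pvLoopA, pvSliceFromEmpty ir pos h0 (by push_cast at hn; omega)]
    simp
  | succ fuel ih =>
    intro out pos h0 hn hnone
    by_cases hlt : pos < (ir.length : Int)
    · rw [pvLoopA, if_pos hlt, hnone pos le_rfl hlt]
      have hrec := ih (out ++ [PySem.List.pyGetD ir pos []]) (pos + 1) (by omega)
        (by push_cast at hn ⊢; omega) (fun x hx1 hx2 => hnone x (by omega) hx2)
      have hslice := pvSliceConsFrom ir pos [] h0 hlt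
      cases hm : nextIdx.get? pos
      · rw [hrec, hslice]; simp
      · rw [hrec, hslice]; simp
    · rw [pvLoopA, if_neg hlt, pvSliceFromEmpty ir pos h0 (by omega)]
      simp

-- proof-only intermediate: a single label-driven scan with a cursor, between A's dict walk
-- and B's two-stage splice
def pvLoopB (ir : List (List (String × String))) (canon : List (String × String × List (List (String × String)))) :
    List (Int × String) → List (List (String × String)) → Int → List (List (String × String))
  | [], out, pos => out ++ PySem.List.slice ir (some pos) none
  | (i, lab1) :: rest, out, pos =>
    if i < pos || (ir.length : Int) ≤ i then
      pvLoopB ir canon rest out pos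
    else
      let out2 := out ++ PySem.List.slice ir (some pos) (some i)
      match rest.head? with
      | some (j, lab2) =>
        match pvCanonGet? canon lab1 lab2 with
        | some block =>
          let orig := (PySem.List.slice ir (some (i + 1)) (some j)).filter (fun s => !pvIsLabelStmt s)
          pvLoopB ir canon rest
            (out2 ++ [PySem.List.pyGetD ir i []] ++ (if orig.isEmpty then block else orig)) j
        | none => pvLoopB ir canon rest (out2 ++ [PySem.List.pyGetD ir i []]) (i + 1)
      | none => pvLoopB ir canon rest (out2 ++ [PySem.List.pyGetD ir i []]) (i + 1)

-- main invariant: A's dict-driven walk from pos agrees with the label-suffix scan pvLoopB,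
-- when the labels already consumed (pre) lie below pos or beyond the end of ir
theorem pvMainAB (ir : List (List (String × String))) (canon : List (String × String × List (List (String × String))))
    (L : List (Int × String)) (hL : L.Pairwise (fun a b => a.1 < b.1)) :
    ∀ (suf pre : List (Int × String)) (out : List (List (String × String))) (pos : Int) (fuel : Nat),
      L = pre ++ suf →
      (∀ p ∈ pre, p.1 < pos ∨ (ir.length : Int) ≤ p.1) →
      0 ≤ pos →
      (ir.length : Int) ≤ pos + (fuel : Int) →
      pvLoopA ir canon (PySem.Dict.ofList L)
          (PySem.Dict.ofList ((L.zip L.tail).map (fun p => (p.1.1, p.2.1)))) fuel out pos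
        = pvLoopB ir canon suf out pos := by
  have hndL : (L.map Prod.fst).Nodup :=
    (List.pairwise_map.mpr hL).imp (fun h => ne_of_lt h)
  have hmapN : (((L.zip L.tail).map (fun p => (p.1.1, p.2.1))).map Prod.fst) = L.dropLast.map Prod.fst := by
    rw [List.map_map, ← pvMapFstZipTail L, List.map_map]
    rfl
  have hndN : (((L.zip L.tail).map (fun p => (p.1.1, p.2.1))).map Prod.fst).Nodup := by
    rw [hmapN]
    exact hndL.sublist ((List.dropLast_sublist L).map Prod.fst)
  intro suf
  induction suf with
  | nil =>
    intro pre out pos fuel hsplit hinv h0 hn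
    rw [pvLoopB, pvTailA ir canon _ _ fuel out pos h0 hn]
    intro x hx1 hx2
    apply pvGetOfListNone
    intro p hp
    rw [hsplit, List.append_nil] at *
    rcases hinv p hp with h | h <;> omega
  | cons hd rest ih =>
    obtain ⟨i, lab1⟩ := hd
    intro pre out pos fuel hsplit hinv h0 hn
    by_cases hskip : i < pos ∨ (ir.length : Int) ≤ i
    · rw [pvLoopB, if_pos (by simp only [Bool.or_eq_true, decide_eq_true_eq]; exact hskip)]
      apply ih (pre ++ [(i, lab1)]) out pos fuel (by rw [hsplit, List.append_assoc]; rfl)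
        ?_ h0 hn
      intro p hp
      rcases List.mem_append.mp hp with h | h
      · exact hinv p h
      · simp only [List.mem_singleton] at h
        subst h
        exact hskip
    · push Not at hskip
      obtain ⟨hpi, hin⟩ := hskip
      have hpi' : pos ≤ i := by omega
      have hmemL : (i, lab1) ∈ L := by
        rw [hsplit]; exact List.mem_append_right _ List.mem_cons_self
      have hpair : ((i, lab1) :: rest).Pairwise (fun a b => a.1 < b.1) :=
        (hsplit ▸ hL).sublist (List.sublist_append_right pre _)
      have hrest_gt : ∀ p ∈ rest, i < p.1 := fun p hp => (List.pairwise_cons.mp hpair).1 p hp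
      set g : Nat := (i - pos).toNat with hg
      have hfuel : fuel = g + (fuel - g) := by omega
      have hgap : ∀ x : Int, pos ≤ x → x < pos + (g : Int) →
          (PySem.Dict.ofList L).get? x = none := by
        intro x hx1 hx2
        apply pvGetOfListNone
        intro p hp
        rw [hsplit] at hp
        rcases List.mem_append.mp hp with h | h
        · rcases hinv p h with h' | h' <;> omega
        · rcases List.mem_cons.mp h with h' | h'
          · subst h'; simp only; omega
          · have := hrest_gt p h'; omega
      rw [hfuel, pvCopyA ir canon _ _ g (fuel - g) out pos h0 (by omega) hgap]
      have hpg : pos + (g : Int) = i := by omega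
      rw [hpg]
      have hfe : fuel - g = (fuel - g - 1) + 1 := by omega
      rw [hfe, pvLoopA, if_pos hin]
      have hgetI : (PySem.Dict.ofList L).get? i = some lab1 := pvGetOfListSome L i lab1 hmemL hndL
      rw [hgetI]
      rw [pvLoopB, if_neg (by simp only [Bool.or_eq_true, decide_eq_true_eq]; omega)]
      cases rest with
      | nil =>
        have hgetN : (PySem.Dict.ofList ((L.zip L.tail).map (fun p => (p.1.1, p.2.1)))).get? i = none := by
          apply pvGetOfListNone
          intro p hp
          have hp1 : p.1 ∈ L.dropLast.map Prod.fst := by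
            rw [← hmapN]
            exact List.mem_map_of_mem hp
          rw [hsplit, List.dropLast_concat] at hp1
          obtain ⟨q, hq, hq1⟩ := List.mem_map.mp hp1
          rcases hinv q hq with h | h <;> omega
        rw [hgetN]
        simp only [List.head?_nil]
        exact ih (pre ++ [(i, lab1)]) _ (i + 1) (fuel - g - 1)
          (by rw [hsplit, List.append_assoc]; rfl)
          (by intro p hp
              rcases List.mem_append.mp hp with h | h
              · rcases hinv p h with h' | h' <;> [left; right] <;> omega
              · simp only [List.mem_singleton] at h; subst h; left; simp only; omega)
          (by omega) (by omega)
      | cons hd2 rest' =>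
        obtain ⟨j, lab2⟩ := hd2
        have hij : i < j := hrest_gt (j, lab2) List.mem_cons_self
        have hmemJ : (j, lab2) ∈ L := by
          rw [hsplit]
          exact List.mem_append_right _ (List.mem_cons_of_mem _ List.mem_cons_self)
        have hmemN : (i, j) ∈ (L.zip L.tail).map (fun p => (p.1.1, p.2.1)) := by
          have := pvMemZipTail pre (i, lab1) (j, lab2) rest'
          rw [← hsplit] at this
          exact (List.mem_map_of_mem (f := fun p => (p.1.1, p.2.1)) this : _)
        have hgetN : (PySem.Dict.ofList ((L.zip L.tail).map (fun p => (p.1.1, p.2.1)))).get? i = some j :=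
          pvGetOfListSome _ i j hmemN hndN
        have hgetJ : (PySem.Dict.ofList L).get? j = some lab2 := pvGetOfListSome L j lab2 hmemJ hndL
        rw [hgetN]
        simp only [hgetJ, Option.getD_some, List.head?_cons]
        have hinv' : ∀ p ∈ pre ++ [(i, lab1)], p.1 < j ∨ (ir.length : Int) ≤ p.1 := by
          intro p hp
          rcases List.mem_append.mp hp with h | h
          · rcases hinv p h with h' | h' <;> [left; right] <;> omega
          · simp only [List.mem_singleton] at h; subst h; left; simp only; omega
        cases hc : pvCanonGet? canon lab1 lab2 with
        | some block =>
          exact ih (pre ++ [(i, lab1)]) _ j (fuel - g - 1)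
            (by rw [hsplit, List.append_assoc]; rfl) hinv' (by omega)
            (by omega)
        | none =>
          exact ih (pre ++ [(i, lab1)]) _ (i + 1) (fuel - g - 1)
            (by rw [hsplit, List.append_assoc]; rfl)
            (by intro p hp
                rcases List.mem_append.mp hp with h | h
                · rcases hinv p h with h' | h' <;> [left; right] <;> omega
                · simp only [List.mem_singleton] at h; subst h; left; simp only; omega)
            (by omega) (by omega)

-- every segment start produced by pvSegs is a (nonnegative) first component of a zipped pair
theorem pvSegsStart (ir : List (List (String × String))) (canon : List (String × String × List (List (String × String)))) :
    ∀ (zs : List ((Int × String) × (Int × String))) (s : Int × Int × List (List (String × String))),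
      s ∈ pvSegs ir canon zs → ∃ p ∈ zs, s.1 = p.1.1 := by
  intro zs
  induction zs with
  | nil => intro s hs; simp [pvSegs] at hs
  | cons p ps ih =>
    obtain ⟨⟨i, l1⟩, j, l2⟩ := p
    intro s hs
    rw [pvSegs] at hs
    split_ifs at hs with hg
    · cases hc : pvCanonGet? canon l1 l2 with
      | some block =>
        rw [hc] at hs
        rcases List.mem_cons.mp hs with h | h
        · exact ⟨((i, l1), (j, l2)), List.mem_cons_self, by rw [h]⟩
        · obtain ⟨q, hq, he⟩ := ih s h
          exact ⟨q, List.mem_cons_of_mem _ hq, he⟩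
      | none =>
        rw [hc] at hs
        obtain ⟨q, hq, he⟩ := ih s hs
        exact ⟨q, List.mem_cons_of_mem _ hq, he⟩
    · obtain ⟨q, hq, he⟩ := ih s hs
      exact ⟨q, List.mem_cons_of_mem _ hq, he⟩

-- splicing from pos or from a later cursor q is the same when all segments start at or after q
theorem pvSpliceShift (ir : List (List (String × String)))
    (segs : List (Int × Int × List (List (String × String)))) (out : List (List (String × String)))
    (pos q : Int) (h0 : 0 ≤ pos) (hpq : pos ≤ q) (hseg : ∀ s ∈ segs, q ≤ s.1) :
    pvSplice ir segs out pos = pvSplice ir segs (out ++ PySem.List.slice ir (some pos) (some q)) q := by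
  cases segs with
  | nil =>
    rw [pvSplice, pvSplice, pvSliceSplitFrom ir pos q h0 hpq]
    simp
  | cons s rest =>
    obtain ⟨a, b, r⟩ := s
    have hqa : q ≤ a := hseg (a, b, r) List.mem_cons_self
    rw [pvSplice, pvSplice, pvSliceSplitTo ir pos q a h0 hpq hqa]
    simp

-- bridge: the label-suffix scan equals B's splice of the precomputed segments
theorem pvBridgeBS (ir : List (List (String × String))) (canon : List (String × String × List (List (String × String)))) :
    ∀ (suf : List (Int × String)) (out : List (List (String × String))) (pos : Int),
      0 ≤ pos →
      suf.Pairwise (fun a b => a.1 < b.1) →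
      (∀ p ∈ suf, p.1 < 0 ∨ pos ≤ p.1) →
      pvLoopB ir canon suf out pos = pvSplice ir (pvSegs ir canon (suf.zip suf.tail)) out pos := by
  intro suf
  induction suf with
  | nil => intro out pos _ _ _; rfl
  | cons hd rest ih =>
    obtain ⟨i, lab1⟩ := hd
    intro out pos h0 hsort hinv
    have hsort' : rest.Pairwise (fun a b => a.1 < b.1) := (List.pairwise_cons.mp hsort).2
    have hgt : ∀ p ∈ rest, i < p.1 := (List.pairwise_cons.mp hsort).1
    cases rest with
    | nil =>
      by_cases hskip : i < pos ∨ (ir.length : Int) ≤ i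
      · rw [pvLoopB, if_pos (by simp only [Bool.or_eq_true, decide_eq_true_eq]; exact hskip)]
        rfl
      · push Not at hskip
        obtain ⟨hpi, hin⟩ := hskip
        rw [pvLoopB, if_neg (by simp only [Bool.or_eq_true, decide_eq_true_eq]; omega)]
        simp only [List.head?_nil]
        rw [pvLoopB]
        show out ++ _ ++ _ ++ _ = pvSplice ir (pvSegs ir canon []) out pos
        rw [pvSegs, pvSplice, pvSliceSplitFrom ir pos i h0 hpi,
          pvSliceConsFrom ir i [] (by omega) hin]
        simp
    | cons hd2 rest' =>
      obtain ⟨j, lab2⟩ := hd2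
      have hzip : (((i, lab1) :: (j, lab2) :: rest').zip (((i, lab1) :: (j, lab2) :: rest').tail))
          = ((i, lab1), (j, lab2)) :: (((j, lab2) :: rest').zip (((j, lab2) :: rest').tail)) := by
        simp [List.zip]
      rw [hzip]
      have hij : i < j := hgt (j, lab2) List.mem_cons_self
      by_cases hskip : i < pos ∨ (ir.length : Int) ≤ i
      · rw [pvLoopB, if_pos (by simp only [Bool.or_eq_true, decide_eq_true_eq]; exact hskip)]
        have hguard : ¬ (0 ≤ i ∧ i < (ir.length : Int)) := by
          rcases hskip with h | h
          · rcases hinv (i, lab1) List.mem_cons_self with h' | h'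
            · simp only at h'; omega
            · simp only at h'; omega
          · omega
        rw [pvSegs, if_neg hguard]
        exact ih out pos h0 hsort' (fun p hp => hinv p (List.mem_cons_of_mem _ hp))
      · push Not at hskip
        obtain ⟨hpi, hin⟩ := hskip
        rw [pvLoopB, if_neg (by simp only [Bool.or_eq_true, decide_eq_true_eq]; omega)]
        simp only [List.head?_cons]
        rw [pvSegs, if_pos ⟨by omega, hin⟩]
        cases hc : pvCanonGet? canon lab1 lab2 with
        | some block =>
          show pvLoopB ir canon ((j, lab2) :: rest')
              (out ++ PySem.List.slice ir (some pos) (some i) ++ [PySem.List.pyGetD ir i []] ++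
                (if ((PySem.List.slice ir (some (i + 1)) (some j)).filter (fun s => !pvIsLabelStmt s)).isEmpty
                 then block else (PySem.List.slice ir (some (i + 1)) (some j)).filter (fun s => !pvIsLabelStmt s))) j
            = pvSplice ir (pvSegs ir canon (((j, lab2) :: rest').zip (((j, lab2) :: rest').tail)))
                (out ++ PySem.List.slice ir (some pos) (some i) ++
                  PySem.List.pyGetD ir i [] ::
                    (if ((PySem.List.slice ir (some (i + 1)) (some j)).filter (fun s => !pvIsLabelStmt s)).isEmpty
                     then block else (PySem.List.slice ir (some (i + 1)) (some j)).filter (fun s => !pvIsLabelStmt s))) j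
          rw [ih _ j (by omega) hsort'
            (by intro p hp
                rcases List.mem_cons.mp hp with h | h
                · subst h; right; simp only; omega
                · right; exact le_of_lt ((List.pairwise_cons.mp hsort').1 p h))]
          congr 1
          simp
        | none =>
          show pvLoopB ir canon ((j, lab2) :: rest')
              (out ++ PySem.List.slice ir (some pos) (some i) ++ [PySem.List.pyGetD ir i []]) (i + 1)
            = pvSplice ir (pvSegs ir canon (((j, lab2) :: rest').zip (((j, lab2) :: rest').tail))) out pos
          rw [ih _ (i + 1) (by omega) hsort'
            (by intro p hp
                rcases List.mem_cons.mp hp with h | h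
                · subst h; right; simp only; omega
                · right; have := hgt p (List.mem_cons_of_mem _ h); omega)]
          rw [pvSpliceShift ir _ out pos (i + 1) h0 (by omega)
            (by intro s hs
                obtain ⟨p, hp, he⟩ := pvSegsStart ir canon _ s hs
                have hq := (List.of_mem_zip hp).1
                have := hgt p.1 hq
                omega)]
          congr 1
          rw [pvSliceSplitTo ir pos i (i + 1) h0 hpi (by omega),
            pvSliceConsTo ir i (i + 1) [] (by omega) (by omega) hin,
            pvSliceEmpty ir (i + 1) (by omega)]
          simp

-- when no pair of label names is a canon key, A's loop copies ir verbatim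
theorem pvMissA (ir : List (List (String × String))) (canon : List (String × String × List (List (String × String))))
    (L : List (Int × String))
    (hmiss : ∀ v1 ∈ L.map Prod.snd, ∀ v2 ∈ L.map Prod.snd, pvCanonGet? canon v1 v2 = none) :
    ∀ (fuel : Nat) (out : List (List (String × String))) (pos : Int), 0 ≤ pos →
      (ir.length : Int) ≤ pos + (fuel : Int) →
      pvLoopA ir canon (PySem.Dict.ofList L)
          (PySem.Dict.ofList ((L.zip L.tail).map (fun p => (p.1.1, p.2.1)))) fuel out pos
        = out ++ PySem.List.slice ir (some pos) none := by
  intro fuel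
  induction fuel with
  | zero =>
    intro out pos h0 hn
    rw [pvLoopA, pvSliceFromEmpty ir pos h0 (by push_cast at hn; omega)]
    simp
  | succ fuel ih =>
    intro out pos h0 hn
    by_cases hlt : pos < (ir.length : Int)
    · have hrec := ih (out ++ [PySem.List.pyGetD ir pos []]) (pos + 1) (by omega)
        (by push_cast at hn ⊢; omega)
      have hslice := pvSliceConsFrom ir pos [] h0 hlt
      rw [pvLoopA, if_pos hlt]
      cases hla : (PySem.Dict.ofList L).get? pos with
      | none =>
        cases hnx : (PySem.Dict.ofList ((L.zip L.tail).map (fun p => (p.1.1, p.2.1)))).get? pos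
        · rw [hrec, hslice]; simp
        · rw [hrec, hslice]; simp
      | some lab1 =>
        cases hnx : (PySem.Dict.ofList ((L.zip L.tail).map (fun p => (p.1.1, p.2.1)))).get? pos with
        | none => rw [hrec, hslice]; simp
        | some j =>
          have hjval : j ∈ ((L.zip L.tail).map (fun p => (p.1.1, p.2.1))).map Prod.snd :=
            pvGetOfListVal _ pos j hnx
          have hjkeys : j ∈ L.map Prod.fst := by
            have h1 : ((L.zip L.tail).map (fun p => (p.1.1, p.2.1))).map Prod.snd
                = L.tail.map Prod.fst := by
              rw [List.map_map, show (Prod.snd ∘ fun p : (Int × String) × (Int × String) => (p.1.1, p.2.1)) = (Prod.fst ∘ Prod.snd) from rfl,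
                ← List.map_map, List.map_snd_zip (by rw [List.length_tail]; omega)]
            rw [h1] at hjval
            exact ((List.tail_sublist L).map Prod.fst).mem hjval
          obtain ⟨lab2, hlab2⟩ := Option.isSome_iff_exists.mp (pvGetOfListIsSome L j hjkeys)
          simp only [hlab2, Option.getD_some,
            hmiss lab1 (pvGetOfListVal L pos lab1 hla) lab2 (pvGetOfListVal L j lab2 hlab2)]
          rw [hrec, hslice]; simp
    · rw [pvLoopA, if_neg hlt, pvSliceFromEmpty ir pos h0 (by omega)]
      simp

-- when no pair of label names is a canon key, B produces no segments
theorem pvSegsNilOfMiss (ir : List (List (String × String))) (canon : List (String × String × List (List (String × String)))) :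
    ∀ (zs : List ((Int × String) × (Int × String))),
      (∀ p ∈ zs, pvCanonGet? canon p.1.2 p.2.2 = none) →
      pvSegs ir canon zs = [] := by
  intro zs
  induction zs with
  | nil => intro _; rfl
  | cons p ps ih =>
    obtain ⟨⟨i, l1⟩, j, l2⟩ := p
    intro hmiss
    rw [pvSegs]
    have hc : pvCanonGet? canon l1 l2 = none := hmiss _ List.mem_cons_self
    split_ifs
    · rw [hc]
      exact ih (fun q hq => hmiss q (List.mem_cons_of_mem _ hq))
    · exact ih (fun q hq => hmiss q (List.mem_cons_of_mem _ hq))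

-- ===== VERDICT (by name: the statement is the Claim_ definition above) =====
theorem fill_ir_spec : Claim_equal_fill_ir := by
  intro ir labels occs canon _ hpre
  unfold Spec_fill_ir fill_ir fill_ir_alt
  rcases hpre with hsorted | hm
  · rw [pvMainAB ir canon labels hsorted labels [] [] 0 ir.length rfl (by simp) le_rfl (by omega)]
    exact pvBridgeBS ir canon labels [] 0 le_rfl hsorted (by intro p _; omega)
  · have hcg : ∀ v1 ∈ labels.map Prod.snd, ∀ v2 ∈ labels.map Prod.snd,
        pvCanonGet? canon v1 v2 = none := by
      intro v1 h1 v2 h2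
      obtain ⟨a, ha, rfl⟩ := List.mem_map.mp h1
      obtain ⟨b, hb, rfl⟩ := List.mem_map.mp h2
      unfold pvCanonGet?
      rw [List.find?_eq_none.mpr]
      · rfl
      · intro c hc
        have := hm a ha b hb c hc
        simp only [Bool.and_eq_true, beq_iff_eq]
        tauto
    rw [pvMissA ir canon labels hcg ir.length [] 0 le_rfl (by omega),
      pvSegsNilOfMiss ir canon _ (by
        intro p hp
        obtain ⟨h1, h2⟩ := List.of_mem_zip hp
        exact hcg p.1.2 (List.mem_map_of_mem h1) p.2.2
          (List.mem_map_of_mem ((List.tail_sublist labels).mem h2))),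
      pvSplice]
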